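-- pv_equiv track=rewrite | github.com/airKlizz/GreenMail | method_3/method_3_function.py | get_dict_and_single_list_words
-- ===== SOURCE A (Python) =====
-- def get_dict_and_single_list_words(list_words):
--     dict_words = dict()
--     list_single_words = []
--     precedent_value = ''
--     for word in list_words:
--         if word != '':
--             if precedent_value != word:
--                 dict_words[word] = 1
--                 list_single_words.append(word)
--                 precedent_value = word
--             else:
--                 dict_words[word] += 1
--
--     return dict_words, list_single_words
-- ===== SOURCE B (Python) =====
-- def get_dict_and_single_list_words(list_words):
--     # Filter out empties first, then split the remainder into maximal consecutive
--     # runs with a two-pointer scan; the dict and the list are both derived from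
--     # the run list (later runs of the same word overwrite the earlier count).
--     filtered = [w for w in list_words if w != '']
--     runs = []
--     i = 0
--     while i < len(filtered):
--         j = i + 1
--         while j < len(filtered) and filtered[j] == filtered[i]:
--             j += 1
--         runs.append((filtered[i], j - i))
--         i = j
--     dict_words = {k: n for k, n in runs}
--     return dict_words, [k for k, _ in runs]
-- ===== Notes on version B (the rewrite author's own statement) =====
-- stated objective: alternative
-- what changed: B filters out empty strings up front, splits the remainder into maximal consecutive runs with a two-pointer scan, and builds the dict (later runs overwrite) and the word list from that run list, instead of A's single pass tracking a precedent-value and incrementing counts in place.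
import Mathlib
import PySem

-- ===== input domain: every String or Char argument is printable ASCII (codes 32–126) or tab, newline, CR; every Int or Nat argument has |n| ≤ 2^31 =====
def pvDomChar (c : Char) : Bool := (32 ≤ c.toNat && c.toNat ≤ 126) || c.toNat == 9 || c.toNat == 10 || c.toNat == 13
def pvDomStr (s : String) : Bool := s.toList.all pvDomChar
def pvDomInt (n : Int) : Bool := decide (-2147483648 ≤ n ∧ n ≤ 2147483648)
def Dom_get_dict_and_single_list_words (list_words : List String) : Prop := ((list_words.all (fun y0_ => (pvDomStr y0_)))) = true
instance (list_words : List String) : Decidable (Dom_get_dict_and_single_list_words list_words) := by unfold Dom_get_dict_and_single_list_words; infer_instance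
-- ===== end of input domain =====

-- B filters empties first and groups the rest into maximal consecutive runs (two-pointer scan),
-- deriving both outputs from the run list; same O(n) cost, genuinely different decomposition.


-- ===== PORT A =====
-- A's `dict_words[word] += 1` only runs when the key is already present (it was inserted when the
-- current run started), so Dict.modify (read-with-default then write) is exact on every reachable state.
def pvStepA (st : PySem.Dict String Int × List String × String) (word : String) :
    PySem.Dict String Int × List String × String :=
  if word ≠ "" then
    if st.2.2 ≠ word then (st.1.insert word 1, st.2.1 ++ [word], word)
    else (st.1.modify word 0 (· + 1), st.2.1, st.2.2)
  else st

def get_dict_and_single_list_words (list_words : List String) : (List (String × Int)) × List String :=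
  let st := list_words.foldl pvStepA ((PySem.Dict.empty : PySem.Dict String Int), ([] : List String), "")
  (st.1.items, st.2.1)

-- ===== PORT B =====
-- the two-pointer run scan of Source B: one maximal consecutive run per step
def pvRuns : List String → List (String × Int)
  | [] => []
  | x :: xs =>
      (x, (1 + (xs.takeWhile (· == x)).length : Int)) :: pvRuns (xs.dropWhile (· == x))
termination_by xs => xs.length
decreasing_by
  exact Nat.lt_succ_of_le (List.length_dropWhile_le _ _)

def get_dict_and_single_list_words_alt (list_words : List String) : (List (String × Int)) × List String :=
  let rs := pvRuns (list_words.filter (fun w => w != ""))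
  ((rs.foldl (fun d p => d.insert p.1 p.2) (PySem.Dict.empty : PySem.Dict String Int)).items,
   rs.map Prod.fst)

-- ===== PRECONDITION & SPEC =====
def Spec_get_dict_and_single_list_words (list_words : List String) (out : (List (String × Int)) × List String) : Prop := out = get_dict_and_single_list_words_alt list_words
instance (list_words : List String) (out : (List (String × Int)) × List String) : Decidable (Spec_get_dict_and_single_list_words list_words out) := by unfold Spec_get_dict_and_single_list_words; infer_instance

-- ===== CLAIM (what is proved, stated in full; the proofs are below) =====
def Claim_equal_get_dict_and_single_list_words : Prop := ∀ (list_words : List String), Dom_get_dict_and_single_list_words list_words → Spec_get_dict_and_single_list_words list_words (get_dict_and_single_list_words list_words)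

-- ===== LEMMAS AND PROOFS =====

-- pvStepA is the identity on "", so A's fold only sees the filtered list
theorem pvFoldA_filter (xs : List String) (st : PySem.Dict String Int × List String × String) :
    xs.foldl pvStepA st = (xs.filter (fun w => w != "")).foldl pvStepA st := by
  induction xs generalizing st with
  | nil => rfl
  | cons x xs ih =>
      by_cases hx : x = ""
      · subst hx
        simpa [pvStepA] using ih st
      · simp only [List.filter_cons, List.foldl_cons]
        have : (x != "") = true := by simpa using hx
        simp [this, ih]

-- k iterated `+= 1` modifies on a freshly inserted key just add k to the stored value
theorem pvIncr_insert (d : PySem.Dict String Int) (x : String) (v : Int) (k : Nat) :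
    (List.replicate k ()).foldl (fun d _ => PySem.Dict.modify d x 0 (· + 1)) (d.insert x v)
      = d.insert x (v + k) := by
  induction k generalizing d v with
  | zero => simp
  | succ k ih =>
      have h1 : PySem.Dict.modify (d.insert x v) x 0 (· + 1) = d.insert x (v + 1) := by
        have hg : (d.insert x v).getD x 0 = v := PySem.Dict.getD_insert_self d x v 0
        show (d.insert x v).insert x ((d.insert x v).getD x 0 + 1) = d.insert x (v + 1)
        rw [hg, PySem.Dict.insert_insert_self]
      rw [List.replicate_succ, List.foldl_cons, h1, ih]
      congr 1
      push_cast
      ring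

theorem pvRuns_cons (x : String) (xs : List String) :
    pvRuns (x :: xs)
      = (x, (1 + (xs.takeWhile (· == x)).length : Int)) :: pvRuns (xs.dropWhile (· == x)) := by
  rw [pvRuns.eq_def]

-- main invariant: on an empty-free list, A's fold from state (d, ls, prec) produces B's run
-- decomposition, with a leading run of `prec` folded into d by iterated modifies
theorem pvMain (xs : List String) (d : PySem.Dict String Int) (ls : List String) (prec : String)
    (hne : ∀ w ∈ xs, w ≠ "") :
    ((xs.foldl pvStepA (d, ls, prec)).1, (xs.foldl pvStepA (d, ls, prec)).2.1)
      = ((pvRuns (xs.dropWhile (· == prec))).foldl (fun d p => d.insert p.1 p.2)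
            ((List.replicate (xs.takeWhile (· == prec)).length ()).foldl
              (fun d _ => PySem.Dict.modify d prec 0 (· + 1)) d),
         ls ++ (pvRuns (xs.dropWhile (· == prec))).map Prod.fst) := by
  induction xs generalizing d ls prec with
  | nil => rw [pvRuns.eq_def]; simp
  | cons x xs ih =>
      have hx : x ≠ "" := hne x (by simp)
      have hne' : ∀ w ∈ xs, w ≠ "" := fun w hw => hne w (by simp [hw])
      by_cases hpx : prec = x
      · subst hpx
        have hstep : pvStepA (d, ls, prec) prec
            = (PySem.Dict.modify d prec 0 (· + 1), ls, prec) := by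
          simp [pvStepA, hx]
        rw [List.foldl_cons, hstep,
            List.takeWhile_cons_of_pos (by simp), List.dropWhile_cons_of_pos (by simp),
            List.length_cons, List.replicate_succ, List.foldl_cons]
        exact ih _ _ _ hne'
      · have hstep : pvStepA (d, ls, prec) x
            = (d.insert x 1, ls ++ [x], x) := by
          simp [pvStepA, hx, hpx]
        have hb : (x == prec) = false := by
          simp [Ne.symm hpx]
        rw [List.foldl_cons, hstep,
            List.takeWhile_cons_of_neg (by simp [hb]), List.dropWhile_cons_of_neg (by simp [hb])]
        rw [ih (d.insert x 1) (ls ++ [x]) x hne']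
        rw [pvIncr_insert]
        rw [pvRuns_cons]
        simp

-- with prec = "" and no empty words, the leading run is empty
theorem pvTakeDrop_empty (xs : List String) (hne : ∀ w ∈ xs, w ≠ "") :
    xs.takeWhile (· == "") = [] ∧ xs.dropWhile (· == "") = xs := by
  cases xs with
  | nil => simp
  | cons x xs =>
      have hx : (x == "") = false := by simpa using hne x (by simp)
      constructor
      · exact List.takeWhile_cons_of_neg (by simp [hx])
      · exact List.dropWhile_cons_of_neg (by simp [hx])

-- ===== VERDICT (by name: the statement is the Claim_ definition above) =====
theorem get_dict_and_single_list_words_spec : Claim_equal_get_dict_and_single_list_words := by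
  intro list_words _
  unfold Spec_get_dict_and_single_list_words
  unfold get_dict_and_single_list_words get_dict_and_single_list_words_alt
  rw [pvFoldA_filter]
  set f := list_words.filter (fun w => w != "") with hf
  have hne : ∀ w ∈ f, w ≠ "" := by
    intro w hw
    have := (List.mem_filter.mp (hf ▸ hw)).2
    simpa using this
  have h := pvMain f PySem.Dict.empty [] "" hne
  obtain ⟨ht, hd⟩ := pvTakeDrop_empty f hne
  rw [ht, hd] at h
  simp only [List.length_nil, List.replicate_zero, List.foldl_nil, List.nil_append] at h
  rw [Prod.mk.injEq] at h
  obtain ⟨h1, h2⟩ := h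
  dsimp only
  rw [h1, h2]
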